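-- pv_equiv track=rewrite | github.com/carcar12321/Easydsd | dart_gui.py | group_note_tables
-- ===== SOURCE A (Python) =====
-- def group_note_tables(remaining,note_assignment,notes_per_sheet=5):
--     """{table_idx:note_num}으로 주석 시트 그룹핑 → [(sname,[tbl...],True),...]"""
--     note_groups={}; unassigned=[]
--     for tbl in remaining:
--         n=note_assignment.get(tbl['idx'])
--         # n이 0이거나 None이면 미분류 처리
--         if n and isinstance(n,int) and n>0:
--             note_groups.setdefault(n,[]).append(tbl)
--         else: unassigned.append(tbl)
--     sorted_notes=sorted(note_groups.keys())
--     groups=[]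
--     for i in range(0,len(sorted_notes),notes_per_sheet):
--         chunk=sorted_notes[i:i+notes_per_sheet]
--         tbls=[]
--         for n in chunk: tbls.extend(note_groups[n])
--         fn,ln=chunk[0],chunk[-1]
--         sname=(f'📝주석_{fn}' if fn==ln else f'📝주석_{fn}_{ln}')
--         groups.append((sname[:31],tbls,True))
--     if unassigned:
--         for ci,st in enumerate(range(0,len(unassigned),10),1):
--             groups.append((f'📝기타_{ci:02d}'[:31],unassigned[st:st+10],True))
--     return groups
-- ===== SOURCE B (Python) =====
-- def group_note_tables(remaining, note_assignment, notes_per_sheet=5):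
--     """Dict-free rewrite: partition by validity, sorted set of notes, per-note filters."""
--     def note(tbl):
--         n = note_assignment.get(tbl['idx'])
--         return n if isinstance(n, int) and n > 0 else None
--     assigned = [t for t in remaining if note(t) is not None]
--     unassigned = [t for t in remaining if note(t) is None]
--     notes = sorted({note(t) for t in assigned})
--     def sheet(chunk):
--         fn, ln = chunk[0], chunk[-1]
--         sname = f'📝주석_{fn}' if fn == ln else f'📝주석_{fn}_{ln}'
--         return (sname[:31], [t for n in chunk for t in assigned if note(t) == n], True)
--     return ([sheet(notes[i:i + notes_per_sheet]) for i in range(0, len(notes), notes_per_sheet)]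
--             + [(f'📝기타_{ci:02d}'[:31], unassigned[st:st + 10], True)
--                for ci, st in enumerate(range(0, len(unassigned), 10), 1)])
-- ===== Notes on version B (the rewrite author's own statement) =====
-- stated objective: simpler
-- what changed: B drops A's note->tables dict and its append/setdefault state machine entirely: it partitions the tables by note validity with two comprehensions, takes sorted(set(...)) of the note numbers, and builds each sheet's table list by per-note filters over the assigned tables; both sheet lists are produced as list comprehensions instead of append loops.
import Mathlib
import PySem

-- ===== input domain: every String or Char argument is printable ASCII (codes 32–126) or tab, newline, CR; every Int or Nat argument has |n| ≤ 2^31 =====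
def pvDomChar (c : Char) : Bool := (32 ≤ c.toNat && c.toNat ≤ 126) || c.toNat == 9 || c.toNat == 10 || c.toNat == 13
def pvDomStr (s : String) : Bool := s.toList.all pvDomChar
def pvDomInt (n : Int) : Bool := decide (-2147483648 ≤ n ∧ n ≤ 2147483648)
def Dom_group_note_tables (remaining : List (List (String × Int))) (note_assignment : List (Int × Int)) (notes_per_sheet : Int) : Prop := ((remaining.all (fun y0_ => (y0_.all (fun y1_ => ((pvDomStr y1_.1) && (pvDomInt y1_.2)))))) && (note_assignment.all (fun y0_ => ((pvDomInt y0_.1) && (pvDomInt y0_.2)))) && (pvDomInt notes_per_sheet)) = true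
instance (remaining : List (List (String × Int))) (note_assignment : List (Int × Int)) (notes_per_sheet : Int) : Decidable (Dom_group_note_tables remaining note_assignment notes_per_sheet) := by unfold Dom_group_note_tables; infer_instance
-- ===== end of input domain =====

-- B replaces A's note→tables dict with filter/sorted-set comprehensions (objective: simpler); same return value on Pre_.

-- shared helpers (both Pythons compute them with the same expressions):
-- note_assignment.get(tbl['idx']); tbl['idx'] via getD is exact under Pre_ ("idx" present, else Python raises KeyError)
def gntNote (na : List (Int × Int)) (t : List (String × Int)) : Option Int :=
  PySem.Dict.get? (PySem.Dict.ofList na) (PySem.Dict.getD (PySem.Dict.ofList t) "idx" 0)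
-- f'{n:02d}' — exact for n ≥ 0 (only called with n ≥ 1)
def gntPad2 (n : Int) : String :=
  if n < 10 then "0" ++ PySem.Int.toStr n else PySem.Int.toStr n

-- ===== PORT A =====
def group_note_tables (remaining : List (List (String × Int))) (note_assignment : List (Int × Int)) (notes_per_sheet : Int) : List (String × (List (List (String × Int))) × Bool) :=
  -- note_groups/unassigned loop; setdefault(n,[]).append(tbl) is modify n [] (· ++ [tbl])
  let st := remaining.foldl (fun st tbl =>
      match gntNote note_assignment tbl with
      | some v => if 0 < v then (PySem.Dict.modify st.1 v [] (fun g => g ++ [tbl]), st.2)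
                  else (st.1, st.2 ++ [tbl])
      | none => (st.1, st.2 ++ [tbl]))
    ((PySem.Dict.empty : PySem.Dict Int (List (List (String × Int)))), ([] : List (List (String × Int))))
  let sortedNotes := PySem.List.sorted (PySem.Dict.keys st.1) (fun x => x) false
  let groups := (PySem.List.pyRange 0 (sortedNotes.length : Int) notes_per_sheet).foldl (fun acc i =>
      let chunk := PySem.List.slice sortedNotes (some i) (some (i + notes_per_sheet))
      let tbls := chunk.foldl (fun t n => t ++ PySem.Dict.getD st.1 n []) []
      -- chunk[0] / chunk[-1]; chunk is never empty when this body runs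
      let fn := (PySem.List.pyGet? chunk 0).getD 0
      let ln := (PySem.List.pyGet? chunk (-1)).getD 0
      let sname := if fn == ln then "📝주석_" ++ PySem.Int.toStr fn
                   else "📝주석_" ++ PySem.Int.toStr fn ++ "_" ++ PySem.Int.toStr ln
      acc ++ [(PySem.Str.slice sname none (some 31), tbls, true)]) []
  if st.2.isEmpty then groups
  else (PySem.List.enumerate (PySem.List.pyRange 0 (st.2.length : Int) 10) 1).foldl (fun acc p =>
      acc ++ [(PySem.Str.slice ("📝기타_" ++ gntPad2 p.1) none (some 31),
               PySem.List.slice st.2 (some p.2) (some (p.2 + 10)), true)]) groups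

-- ===== PORT B =====
-- Source B's note(): the valid note number, or None
def gntNoteB (na : List (Int × Int)) (t : List (String × Int)) : Option Int :=
  match gntNote na t with
  | some v => if 0 < v then some v else none
  | none => none

-- Source B's sheet(chunk)
def gntSheet (assigned : List (List (String × Int))) (na : List (Int × Int)) (chunk : List Int) : String × (List (List (String × Int))) × Bool :=
  let fn := (PySem.List.pyGet? chunk 0).getD 0
  let ln := (PySem.List.pyGet? chunk (-1)).getD 0
  let sname := if fn == ln then "📝주석_" ++ PySem.Int.toStr fn
               else "📝주석_" ++ PySem.Int.toStr fn ++ "_" ++ PySem.Int.toStr ln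
  (PySem.Str.slice sname none (some 31),
   chunk.flatMap (fun n => assigned.filter (fun t => gntNoteB na t == some n)), true)

def group_note_tables_alt (remaining : List (List (String × Int))) (note_assignment : List (Int × Int)) (notes_per_sheet : Int) : List (String × (List (List (String × Int))) × Bool) :=
  let assigned := remaining.filter (fun t => (gntNoteB note_assignment t).isSome)
  let unassigned := remaining.filter (fun t => !(gntNoteB note_assignment t).isSome)
  -- note(t) is some v on every assigned t, so getD 0 is exact
  let notes := PySem.List.sorted (PySem.Set.ofList (assigned.map (fun t => (gntNoteB note_assignment t).getD 0))) (fun x => x) false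
  (PySem.List.pyRange 0 (notes.length : Int) notes_per_sheet).map
      (fun i => gntSheet assigned note_assignment (PySem.List.slice notes (some i) (some (i + notes_per_sheet))))
  ++ (PySem.List.enumerate (PySem.List.pyRange 0 (unassigned.length : Int) 10) 1).map
      (fun p => (PySem.Str.slice ("📝기타_" ++ gntPad2 p.1) none (some 31),
                 PySem.List.slice unassigned (some p.2) (some (p.2 + 10)), true))

-- ===== PRECONDITION & SPEC =====
-- Pre_ excludes exactly the inputs where the Python raises: a table without an "idx" key (KeyError)
-- and notes_per_sheet = 0 (ValueError from range's zero step).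
def Pre_group_note_tables (remaining : List (List (String × Int))) (_note_assignment : List (Int × Int)) (notes_per_sheet : Int) : Prop :=
  (∀ t ∈ remaining, PySem.Dict.contains (PySem.Dict.ofList t) "idx" = true) ∧ notes_per_sheet ≠ 0
instance (remaining : List (List (String × Int))) (note_assignment : List (Int × Int)) (notes_per_sheet : Int) : Decidable (Pre_group_note_tables remaining note_assignment notes_per_sheet) := by unfold Pre_group_note_tables; infer_instance

def pvWitness_group_note_tables : (List (List (String × Int))) × (List (Int × Int)) × Int :=
  ([[("idx", 1)], [("idx", 2)], [("idx", 3)]], [(1, 2), (2, 1)], 5)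

def Spec_group_note_tables (remaining : List (List (String × Int))) (note_assignment : List (Int × Int)) (notes_per_sheet : Int) (out : List (String × (List (List (String × Int))) × Bool)) : Prop := out = group_note_tables_alt remaining note_assignment notes_per_sheet
instance (remaining : List (List (String × Int))) (note_assignment : List (Int × Int)) (notes_per_sheet : Int) (out : List (String × (List (List (String × Int))) × Bool)) : Decidable (Spec_group_note_tables remaining note_assignment notes_per_sheet out) := by unfold Spec_group_note_tables; infer_instance

-- ===== CLAIM (what is proved, stated in full; the proofs are below) =====
def Claim_equal_group_note_tables : Prop := ∀ (remaining : List (List (String × Int))) (note_assignment : List (Int × Int)) (notes_per_sheet : Int), Dom_group_note_tables remaining note_assignment notes_per_sheet → Pre_group_note_tables remaining note_assignment notes_per_sheet → Spec_group_note_tables remaining note_assignment notes_per_sheet (group_note_tables remaining note_assignment notes_per_sheet)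

-- ===== LEMMAS AND PROOFS =====


-- proof-only helpers: the two independent accumulators of A's first loop
def gntP (na : List (Int × Int)) (t : List (String × Int)) : Bool := (gntNoteB na t).isSome

def gntFA (na : List (Int × Int)) (d : PySem.Dict Int (List (List (String × Int)))) (t : List (String × Int)) : PySem.Dict Int (List (List (String × Int))) :=
  if gntP na t then d.modify ((gntNote na t).getD 0) [] (fun g => g ++ [t]) else d

def gntGA (na : List (Int × Int)) (un : List (List (String × Int))) (t : List (String × Int)) : List (List (String × Int)) :=
  if gntP na t then un else un ++ [t]

theorem gnt_fold_pair (na : List (Int × Int)) (l : List (List (String × Int)))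
    (d : PySem.Dict Int (List (List (String × Int)))) (un : List (List (String × Int))) :
    l.foldl (fun st tbl =>
      match gntNote na tbl with
      | some v => if 0 < v then (PySem.Dict.modify st.1 v [] (fun g => g ++ [tbl]), st.2)
                  else (st.1, st.2 ++ [tbl])
      | none => (st.1, st.2 ++ [tbl])) (d, un)
    = (l.foldl (gntFA na) d, l.foldl (gntGA na) un) := by
  induction l generalizing d un with
  | nil => rfl
  | cons a l ih =>
    have hstep : (match gntNote na a with
      | some v => if 0 < v then (PySem.Dict.modify d v [] (fun g => g ++ [a]), un)
                  else (d, un ++ [a])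
      | none => (d, un ++ [a])) = (gntFA na d a, gntGA na un a) := by
      unfold gntFA gntGA gntP gntNoteB
      cases h : gntNote na a with
      | none => simp
      | some v => by_cases hv : 0 < v <;> simp [hv]
    simp only [List.foldl_cons, hstep, ih]

theorem gnt_un_eq (na : List (Int × Int)) (l : List (List (String × Int))) :
    l.foldl (gntGA na) [] = l.filter (fun t => !(gntNoteB na t).isSome) := by
  have h : gntGA na = fun acc x => if (!gntP na x) then acc ++ [x] else acc := by
    funext acc x; unfold gntGA
    cases gntP na x <;> simp
  rw [h, PySem.List.foldl_append_if_eq_filter]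
  simp [gntP]

theorem gnt_getD (na : List (Int × Int)) (asg : List (List (String × Int))) (c : Int) :
    (asg.foldl (fun d t => d.modify ((gntNote na t).getD 0) [] (fun g => g ++ [t])) PySem.Dict.empty).getD c []
      = asg.filter (fun t => (gntNote na t).getD 0 == c) := by
  have h := PySem.Dict.getD_foldl_modify_append
      (asg.map (fun t => ((gntNote na t).getD 0, t))) (PySem.Dict.empty) c
  rw [List.foldl_map] at h
  rw [h]
  simp [List.filter_map, Function.comp_def]

theorem gnt_keys (na : List (Int × Int)) (asg : List (List (String × Int))) :
    (asg.foldl (fun d t => d.modify ((gntNote na t).getD 0) [] (fun g => g ++ [t])) PySem.Dict.empty).keys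
      = PySem.Set.ofList (asg.map (fun t => (gntNote na t).getD 0)) := by
  rw [PySem.Dict.keys_foldl_modify_key asg (fun t => (gntNote na t).getD 0) [] (fun _ t g => g ++ [t])]
  rw [PySem.Dict.keys_empty, PySem.Set.update_nil_left]

theorem gnt_p_some (na : List (Int × Int)) (t : List (String × Int)) (h : gntP na t = true) :
    ∃ v, gntNote na t = some v ∧ 0 < v ∧ gntNoteB na t = some v := by
  unfold gntP gntNoteB at *
  cases hn : gntNote na t with
  | none => rw [hn] at h; simp at h
  | some v =>
    rw [hn] at h
    by_cases hv : 0 < v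
    · exact ⟨v, rfl, hv, by simp [hv]⟩
    · simp [hv] at h

theorem gnt_main (remaining : List (List (String × Int))) (na : List (Int × Int)) (nps : Int) :
    group_note_tables remaining na nps = group_note_tables_alt remaining na nps := by
  unfold group_note_tables group_note_tables_alt
  rw [gnt_fold_pair]
  simp only []
  rw [gnt_un_eq]
  have hFA : remaining.foldl (gntFA na) PySem.Dict.empty
      = (remaining.filter (gntP na)).foldl
          (fun d t => d.modify ((gntNote na t).getD 0) [] (fun g => g ++ [t])) PySem.Dict.empty := by
    unfold gntFA
    exact PySem.List.foldl_if_eq_foldl_filter (gntP na)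
      (fun d t => PySem.Dict.modify d ((gntNote na t).getD 0) [] (fun g => g ++ [t])) remaining PySem.Dict.empty
  set asg := remaining.filter (fun t => (gntNoteB na t).isSome) with hasg
  have hfilter : remaining.filter (gntP na) = asg := by rfl
  rw [hFA, hfilter]
  -- the sorted note lists coincide
  have hnotes : PySem.List.sorted
      ((asg.foldl (fun d t => d.modify ((gntNote na t).getD 0) [] (fun g => g ++ [t])) PySem.Dict.empty).keys)
      (fun x => x) false
      = PySem.List.sorted (PySem.Set.ofList (asg.map (fun t => (gntNoteB na t).getD 0))) (fun x => x) false := by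
    rw [gnt_keys]
    have : asg.map (fun t => (gntNote na t).getD 0) = asg.map (fun t => (gntNoteB na t).getD 0) := by
      apply List.map_congr_left
      intro t ht
      have hp : gntP na t = true := by
        rw [hasg] at ht; exact (List.mem_filter.mp ht).2
      obtain ⟨v, hv, _, hvb⟩ := gnt_p_some na t hp
      rw [hv, hvb]
    rw [this]
  rw [hnotes]
  set notes := PySem.List.sorted (PySem.Set.ofList (asg.map (fun t => (gntNoteB na t).getD 0))) (fun x => x) false with hnotesdef
  -- per-chunk table lists coincide
  have htbls : ∀ chunk : List Int,
      chunk.foldl (fun t n => t ++ (asg.foldl (fun d t => d.modify ((gntNote na t).getD 0) [] (fun g => g ++ [t])) PySem.Dict.empty).getD n []) []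
      = chunk.flatMap (fun n => asg.filter (fun t => gntNoteB na t == some n)) := by
    intro chunk
    rw [PySem.List.foldl_append_eq_flatMap]
    rw [List.nil_append]
    congr 1
    funext n
    rw [gnt_getD]
    apply List.filter_congr
    intro t ht
    have hp : gntP na t = true := by
      rw [hasg] at ht; exact (List.mem_filter.mp ht).2
    obtain ⟨v, hv, _, hvb⟩ := gnt_p_some na t hp
    rw [hv, hvb]
    simp
  by_cases hun : (remaining.filter (fun t => !(gntNoteB na t).isSome)).isEmpty = true
  · rw [if_pos hun]
    have hnil : remaining.filter (fun t => !(gntNoteB na t).isSome) = [] := by simpa using hun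
    rw [hnil, PySem.List.foldl_append_singleton_eq_map, List.nil_append]
    simp only [List.length_nil, Nat.cast_zero]
    rw [show PySem.List.pyRange 0 (0 : Int) 10 = [] from by decide]
    rw [show PySem.List.enumerate ([] : List Int) 1 = [] from rfl]
    simp only [List.map_nil, List.append_nil]
    apply List.map_congr_left
    intro i _
    simp only [gntSheet]
    rw [htbls]
  · rw [if_neg hun, PySem.List.foldl_append_singleton_eq_map,
        PySem.List.foldl_append_singleton_eq_map, List.nil_append]
    congr 1
    apply List.map_congr_left
    intro i _
    simp only [gntSheet]
    rw [htbls]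

-- ===== VERDICT (by name: the statement is the Claim_ definition above) =====
theorem group_note_tables_spec : Claim_equal_group_note_tables := by
  intro remaining na nps _ _
  unfold Spec_group_note_tables
  exact gnt_main remaining na nps
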